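-- pv_equiv track=rewrite | github.com/kalin5850/coding_practice | algorithms/two_pointers/11_LeastConsecutiveCardstoMatch.py | least_consecutive_cards_to_match
-- ===== SOURCE A (Python) =====
-- from typing import List
--
-- def least_consecutive_cards_to_match(cards: List[int]) -> int:
--     result = []
--     for slow in range(len(cards) - 1):
--         fast = slow + 1
--         while fast <= len(cards) - 1:
--             if cards[fast] not in cards[slow:fast]:
--                 fast += 1
--             else:
--                 result.append(len(cards[slow:fast]) + 1)
--                 break
--     return min(result) if len(result) else -1
-- ===== SOURCE B (Python) =====
-- from typing import List
--
-- def least_consecutive_cards_to_match(cards: List[int]) -> int: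
--     last = {}
--     best = None
--     for i, v in enumerate(cards):
--         if v in last:
--             w = i - last[v] + 1
--             if best is None or w < best:
--                 best = w
--         last[v] = i
--     return best if best is not None else -1
-- ===== Notes on version B (the rewrite author's own statement) =====
-- stated objective: faster
-- what changed: Replaced A's per-start rescan (for each slow, grow fast and re-check cards[fast] against the slice cards[slow:fast]) by a single left-to-right pass that keeps a hashmap of each value's last-seen index and minimizes i - last[v] + 1.
import Mathlib
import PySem

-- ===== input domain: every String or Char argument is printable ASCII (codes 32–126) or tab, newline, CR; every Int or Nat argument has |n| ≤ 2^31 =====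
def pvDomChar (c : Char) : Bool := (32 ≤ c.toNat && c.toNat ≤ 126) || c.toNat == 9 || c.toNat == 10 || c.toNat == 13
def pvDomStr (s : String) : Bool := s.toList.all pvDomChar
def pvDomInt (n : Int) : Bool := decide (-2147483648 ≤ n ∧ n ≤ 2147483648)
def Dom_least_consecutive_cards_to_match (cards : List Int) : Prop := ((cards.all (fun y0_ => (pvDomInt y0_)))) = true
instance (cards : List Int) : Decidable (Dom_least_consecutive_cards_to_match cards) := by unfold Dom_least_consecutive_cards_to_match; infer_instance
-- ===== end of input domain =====

-- B replaces A's cubic slide-and-rescan window search by a single pass with a last-seen-index map (asymptotically faster).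

-- ===== PORT A =====
-- inner `while fast <= len(cards) - 1` loop of A; returns the value appended to `result` (none = no append)
def lccmWhile (cards : List Int) (slow fast : Nat) : Option Int :=
  if h : fast ≤ cards.length - 1 then
    -- `cards[fast]` : index is in range here (loop guard), so pyGetD's default is never used
    if (PySem.List.pyGetD cards (fast : Int) 0) ∉ PySem.List.slice cards (some (slow : Int)) (some (fast : Int)) then
      lccmWhile cards slow (fast + 1)
    else
      some (((PySem.List.slice cards (some (slow : Int)) (some (fast : Int))).length : Int) + 1)
  else none
termination_by cards.length + 1 - fast
decreasing_by omega

def least_consecutive_cards_to_match (cards : List Int) : Int :=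
  let result : List Int :=
    (List.range (cards.length - 1)).foldl
      (fun res slow =>
        match lccmWhile cards slow (slow + 1) with
        | none => res
        | some v => res ++ [v]) []
  if result.length ≠ 0 then
    match PySem.List.min? result (fun x => x) with
    | some m => m
    | none => -1  -- unreachable: result ≠ []
  else -1

-- ===== PORT B =====
-- loop body of B: state = (last-seen dict, best window so far), iv = (index, value)
def lccmStep (st : PySem.Dict Int Int × Option Int) (iv : Int × Int) :
    PySem.Dict Int Int × Option Int :=
  let best :=
    match st.1.get? iv.2 with
    | some li =>
      let w := iv.1 - li + 1
      match st.2 with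
      | none => some w
      | some b => if w < b then some w else st.2
    | none => st.2
  (st.1.insert iv.2 iv.1, best)

def least_consecutive_cards_to_match_alt (cards : List Int) : Int :=
  let st := (PySem.List.enumerate cards).foldl lccmStep (PySem.Dict.empty, none)
  match st.2 with
  | some b => b
  | none => -1

-- ===== PRECONDITION & SPEC =====
def Spec_least_consecutive_cards_to_match (cards : List Int) (out : Int) : Prop := out = least_consecutive_cards_to_match_alt cards
instance (cards : List Int) (out : Int) : Decidable (Spec_least_consecutive_cards_to_match cards out) := by unfold Spec_least_consecutive_cards_to_match; infer_instance

-- ===== CLAIM (what is proved, stated in full; the proofs are below) =====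
def Claim_equal_least_consecutive_cards_to_match : Prop := ∀ (cards : List Int), Dom_least_consecutive_cards_to_match cards → Spec_least_consecutive_cards_to_match cards (least_consecutive_cards_to_match cards)

-- ===== LEMMAS AND PROOFS =====

-- (i, j) is a duplicate pair of `cards`
def IsDup (cards : List Int) (i j : Nat) : Prop :=
  i < j ∧ j < cards.length ∧ cards.getD i 0 = cards.getD j 0

-- `r` is the answer: -1 with no duplicate pair, else the least window j - i + 1 over duplicate pairs
def Good (cards : List Int) (r : Int) : Prop :=
  (r = -1 ∧ ∀ i j, ¬ IsDup cards i j) ∨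
  ((∃ i j, IsDup cards i j ∧ r = (j : Int) - (i : Int) + 1) ∧
    ∀ i j, IsDup cards i j → r ≤ (j : Int) - (i : Int) + 1)

theorem good_unique {cards : List Int} {r r' : Int}
    (h : Good cards r) (h' : Good cards r') : r = r' := by
  rcases h with ⟨h1, h2⟩ | ⟨⟨i, j, hd, hv⟩, hb⟩
  · rcases h' with ⟨h1', _⟩ | ⟨⟨i, j, hd, hv⟩, _⟩
    · omega
    · exact absurd hd (h2 i j)
  · rcases h' with ⟨h1', h2'⟩ | ⟨⟨i', j', hd', hv'⟩, hb'⟩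
    · exact absurd hd (h2' i j)
    · have := hb i' j' hd'
      have := hb' i j hd
      omega

theorem mem_slice_iff (cards : List Int) (s f : Nat) (v : Int) :
    v ∈ (cards.drop s).take (f - s) ↔
      ∃ i, s ≤ i ∧ i < f ∧ i < cards.length ∧ cards.getD i 0 = v := by
  rw [List.mem_iff_getElem]
  constructor
  · rintro ⟨p, hp, hv⟩
    have hlen : ((cards.drop s).take (f - s)).length = min (f - s) (cards.length - s) := by
      simp
    refine ⟨s + p, by omega, by omega, by omega, ?_⟩
    · rw [List.getElem_take, List.getElem_drop] at hv
      rw [List.getD_eq_getElem cards 0 (by omega)]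
      exact hv
  · rintro ⟨i, his, hif, hil, hv⟩
    refine ⟨i - s, by simp; omega, ?_⟩
    rw [List.getElem_take, List.getElem_drop]
    rw [List.getD_eq_getElem cards 0 (by omega)] at hv
    convert hv using 2
    omega

theorem lccmWhile_spec (cards : List Int) (slow : Nat) :
    ∀ (d fast : Nat), cards.length - fast ≤ d → slow < fast →
    (match lccmWhile cards slow fast with
     | some r => ∃ j, fast ≤ j ∧ j < cards.length ∧
         (∃ i, slow ≤ i ∧ i < j ∧ cards.getD i 0 = cards.getD j 0) ∧
         (∀ j', fast ≤ j' → j' < j →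
            ¬ ∃ i, slow ≤ i ∧ i < j' ∧ cards.getD i 0 = cards.getD j' 0) ∧
         r = (j : Int) - (slow : Int) + 1
     | none => ∀ j, fast ≤ j → j < cards.length →
         ¬ ∃ i, slow ≤ i ∧ i < j ∧ cards.getD i 0 = cards.getD j 0) := by
  intro d
  induction d with
  | zero =>
    intro fast hd hsf
    rw [lccmWhile.eq_def, dif_neg (by omega)]
    intro j hj1 hj2
    omega
  | succ d ih =>
    intro fast hd hsf
    by_cases hg : fast ≤ cards.length - 1
    · have hfast : fast < cards.length := by omega
      rw [lccmWhile.eq_def, dif_pos hg, PySem.List.slice_natCast, PySem.List.pyGetD_natCast]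
      by_cases hm : cards.getD fast 0 ∈ (cards.drop slow).take (fast - slow)
      · rw [if_neg (not_not_intro hm)]
        obtain ⟨i, hi1, hi2, hi3, hi4⟩ := (mem_slice_iff cards slow fast _).mp hm
        refine ⟨fast, le_refl _, hfast, ⟨i, hi1, hi2, hi4⟩, by omega, ?_⟩
        have hlen : ((cards.drop slow).take (fast - slow)).length = fast - slow := by
          simp; omega
        rw [hlen]
        omega
      · rw [if_pos hm]
        have hm' : ¬ ∃ i, slow ≤ i ∧ i < fast ∧ cards.getD i 0 = cards.getD fast 0 := by
          intro ⟨i, h1, h2, h3⟩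
          exact hm ((mem_slice_iff cards slow fast _).mpr ⟨i, h1, h2, by omega, h3⟩)
        have H := ih (fast + 1) (by omega) (by omega)
        cases hres : lccmWhile cards slow (fast + 1) with
        | none =>
          rw [hres] at H
          intro j hj1 hj2
          rcases Nat.eq_or_lt_of_le hj1 with h' | h'
          · subst h'; exact hm'
          · exact H j h' hj2
        | some r =>
          rw [hres] at H
          obtain ⟨j, h1, h2, h3, h4, h5⟩ := H
          refine ⟨j, by omega, h2, h3, ?_, h5⟩
          intro j' hj1' hj2'
          rcases Nat.eq_or_lt_of_le hj1' with h' | h'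
          · subst h'; exact hm'
          · exact h4 j' h' hj2'
    · rw [lccmWhile.eq_def, dif_neg hg]
      intro j hj1 hj2
      omega

theorem foldl_append_lccm (cards : List Int) (l : List Nat) (acc : List Int) :
    l.foldl (fun res slow =>
        match lccmWhile cards slow (slow + 1) with
        | none => res
        | some v => res ++ [v]) acc
      = acc ++ l.filterMap (fun slow => lccmWhile cards slow (slow + 1)) := by
  induction l generalizing acc with
  | nil => simp
  | cons x t ih =>
    cases hx : lccmWhile cards x (x + 1) <;> simp [hx, ih]

theorem a_good (cards : List Int) : Good cards (least_consecutive_cards_to_match cards) := by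
  have key : ∀ i j, IsDup cards i j →
      ∃ r, lccmWhile cards i (i + 1) = some r ∧ r ≤ (j : Int) - (i : Int) + 1 := by
    rintro i j ⟨hij, hjn, hc⟩
    have H := lccmWhile_spec cards i cards.length (i + 1) (by omega) (by omega)
    cases hres : lccmWhile cards i (i + 1) with
    | none =>
      rw [hres] at H
      exact absurd ⟨i, le_refl _, hij, hc⟩ (H j (by omega) hjn)
    | some r =>
      rw [hres] at H
      obtain ⟨j', h1, h2, h3, h4, h5⟩ := H
      refine ⟨r, rfl, ?_⟩
      have hj'j : j' ≤ j := by
        by_contra hlt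
        exact h4 j (by omega) (by omega) ⟨i, le_refl _, hij, hc⟩
      omega
  unfold least_consecutive_cards_to_match
  dsimp only
  rw [foldl_append_lccm cards (List.range (cards.length - 1)) []]
  rw [List.nil_append]
  set R := (List.range (cards.length - 1)).filterMap
      (fun slow => lccmWhile cards slow (slow + 1)) with hRdef
  by_cases hR : R = []
  · rw [hR]
    simp only [List.length_nil, ne_eq, not_true_eq_false, if_false]
    left
    refine ⟨rfl, fun i j hd => ?_⟩
    obtain ⟨r, hres, _⟩ := key i j hd
    have hmem : r ∈ R := List.mem_filterMap.mpr
      ⟨i, List.mem_range.mpr (by obtain ⟨h1, h2, _⟩ := hd; omega), hres⟩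
    rw [hR] at hmem
    exact absurd hmem (List.not_mem_nil)
  · obtain ⟨m, hmin⟩ : ∃ m, PySem.List.min? R (fun x => x) = some m := by
      cases h : PySem.List.min? R (fun x => x) with
      | none => exact absurd ((PySem.List.min?_eq_none_iff R _).mp h) hR
      | some m => exact ⟨m, rfl⟩
    rw [if_pos (by simpa using fun h => hR (List.length_eq_zero_iff.mp h)), hmin]
    show Good cards m
    have hbound : ∀ i j, IsDup cards i j → m ≤ (j : Int) - (i : Int) + 1 := by
      intro i j hd
      obtain ⟨r, hres, hr⟩ := key i j hd
      have hmem : r ∈ R := List.mem_filterMap.mpr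
        ⟨i, List.mem_range.mpr (by obtain ⟨h1, h2, _⟩ := hd; omega), hres⟩
      have := PySem.List.min?_isMin hmin r hmem
      omega
    right
    refine ⟨?_, hbound⟩
    have hmem := PySem.List.min?_mem hmin
    obtain ⟨slow, hslow, hres⟩ := List.mem_filterMap.mp hmem
    have H := lccmWhile_spec cards slow cards.length (slow + 1) (by omega) (by omega)
    rw [hres] at H
    obtain ⟨j, h1, h2, ⟨i0, hi0a, hi0b, hi0c⟩, h4, h5⟩ := H
    have hd : IsDup cards i0 j := ⟨hi0b, h2, hi0c⟩
    exact ⟨i0, j, hd, by have := hbound i0 j hd; omega⟩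

-- latest index < k holding value v (the content of B's dict after k steps)
def lastIdx (cards : List Int) : Nat → Int → Option Nat
  | 0, _ => none
  | k + 1, v => if cards.getD k 0 = v then some k else lastIdx cards k v

theorem lastIdx_none {cards : List Int} {k : Nat} {v : Int} :
    lastIdx cards k v = none ↔ ∀ i, i < k → cards.getD i 0 ≠ v := by
  induction k with
  | zero => simp [lastIdx]
  | succ k ih =>
    by_cases h : cards.getD k 0 = v
    · rw [lastIdx, if_pos h]
      constructor
      · intro hc; exact absurd hc (by simp)
      · intro hall; exact absurd h (hall k (by omega))
    · rw [lastIdx, if_neg h, ih]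
      constructor
      · intro hall i hik
        rcases Nat.lt_succ_iff_lt_or_eq.mp hik with h' | h'
        · exact hall i h'
        · subst h'; exact h
      · intro hall i hik; exact hall i (by omega)

theorem lastIdx_some {cards : List Int} {k m : Nat} {v : Int}
    (h : lastIdx cards k v = some m) :
    m < k ∧ cards.getD m 0 = v ∧ ∀ i, i < k → cards.getD i 0 = v → i ≤ m := by
  induction k with
  | zero => simp [lastIdx] at h
  | succ k ih =>
    by_cases hk : cards.getD k 0 = v
    · rw [lastIdx, if_pos hk] at h
      obtain rfl : k = m := by simpa using h
      exact ⟨Nat.lt_succ_self _, hk, fun i hi _ => by omega⟩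
    · rw [lastIdx, if_neg hk] at h
      obtain ⟨h1, h2, h3⟩ := ih h
      refine ⟨by omega, h2, fun i hi hv => ?_⟩
      rcases Nat.lt_succ_iff_lt_or_eq.mp hi with h' | h'
      · exact h3 i h' hv
      · subst h'; exact absurd hv hk

def DictInv (cards : List Int) (k : Nat) (d : PySem.Dict Int Int) : Prop :=
  ∀ v, d.get? v = (lastIdx cards k v).map (fun m => (m : Int))

def GoodUpTo (cards : List Int) (k : Nat) : Option Int → Prop
  | none => ∀ i j, i < j → j < k → cards.getD i 0 ≠ cards.getD j 0
  | some r =>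
      (∃ i j, i < j ∧ j < k ∧ cards.getD i 0 = cards.getD j 0 ∧ r = (j : Int) - (i : Int) + 1) ∧
      ∀ i j, i < j → j < k → cards.getD i 0 = cards.getD j 0 → r ≤ (j : Int) - (i : Int) + 1

theorem enumerate_eq_map_range (cards : List Int) :
    ∀ s : Nat, PySem.List.enumerate cards (s : Int)
      = (List.range cards.length).map (fun i => (((s + i : Nat) : Int), cards.getD i 0)) := by
  induction cards with
  | nil => intro s; simp [PySem.List.enumerate]
  | cons x t ih =>
    intro s
    rw [PySem.List.enumerate]
    have : ((s : Int) + 1) = ((s + 1 : Nat) : Int) := by push_cast; ring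
    rw [this, ih (s + 1)]
    simp [List.range_succ_eq_map, List.map_map]
    intro a _
    omega

theorem b_loop (cards : List Int) :
    ∀ k : Nat, k ≤ cards.length →
      DictInv cards k ((List.range k).foldl
        (fun st (i : Nat) => lccmStep st ((i : Int), cards.getD i 0)) (PySem.Dict.empty, none)).1 ∧
      GoodUpTo cards k ((List.range k).foldl
        (fun st (i : Nat) => lccmStep st ((i : Int), cards.getD i 0)) (PySem.Dict.empty, none)).2 := by
  intro k
  induction k with
  | zero =>
    intro _
    constructor
    · intro v
      simp [lastIdx, PySem.Dict.empty, PySem.Dict.get?]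
    · intro i j h1 h2
      omega
  | succ k ih =>
    intro hk
    obtain ⟨hd, hg⟩ := ih (by omega)
    rw [List.range_succ, List.foldl_append, List.foldl_cons, List.foldl_nil]
    set st := (List.range k).foldl
      (fun st (i : Nat) => lccmStep st ((i : Int), cards.getD i 0))
      ((PySem.Dict.empty : PySem.Dict Int Int), (none : Option Int)) with hstdef
    have hdict : DictInv cards (k + 1) (st.1.insert (cards.getD k 0) (k : Int)) := by
      intro v
      rw [PySem.Dict.get?_insert]
      by_cases hv : v = cards.getD k 0
      · rw [if_pos hv, lastIdx, if_pos hv.symm]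
        rfl
      · rw [if_neg hv, lastIdx, if_neg (fun h => hv h.symm)]
        exact hd v
    cases hres : st.1.get? (cards.getD k 0) with
    | none =>
      have hnone : ∀ i, i < k → cards.getD i 0 ≠ cards.getD k 0 := by
        have := hd (cards.getD k 0)
        rw [hres] at this
        exact lastIdx_none.mp (by
          cases hli : lastIdx cards k (cards.getD k 0) with
          | none => rfl
          | some m => rw [hli] at this; simp at this)
      refine ⟨?_, ?_⟩
      · simp only [lccmStep, hres]
        exact hdict
      · simp only [lccmStep, hres]
        cases hs2 : st.2 with
        | none =>
          rw [hs2] at hg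
          intro i j h1 h2
          rcases Nat.lt_succ_iff_lt_or_eq.mp h2 with h' | h'
          · exact hg i j h1 h'
          · subst h'; exact hnone i h1
        | some r =>
          rw [hs2] at hg
          obtain ⟨⟨i, j, h1, h2, h3, h4⟩, hb⟩ := hg
          refine ⟨⟨i, j, h1, by omega, h3, h4⟩, ?_⟩
          intro i j h1 h2 h3
          rcases Nat.lt_succ_iff_lt_or_eq.mp h2 with h' | h'
          · exact hb i j h1 h' h3
          · subst h'; exact absurd h3 (hnone i h1)
    | some li =>
      obtain ⟨m, hm, rfl⟩ : ∃ m, lastIdx cards k (cards.getD k 0) = some m ∧ li = (m : Int) := by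
        have := hd (cards.getD k 0)
        rw [hres] at this
        cases hli : lastIdx cards k (cards.getD k 0) with
        | none => rw [hli] at this; simp at this
        | some m => rw [hli] at this; simp at this; exact ⟨m, rfl, this⟩
      obtain ⟨hm1, hm2, hm3⟩ := lastIdx_some hm
      refine ⟨?_, ?_⟩
      · simp only [lccmStep, hres]
        exact hdict
      · simp only [lccmStep, hres]
        cases hs2 : st.2 with
        | none =>
          rw [hs2] at hg
          refine ⟨⟨m, k, hm1, by omega, hm2, by omega⟩, ?_⟩
          intro i j h1 h2 h3
          rcases Nat.lt_succ_iff_lt_or_eq.mp h2 with h' | h'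
          · exact absurd h3 (hg i j h1 h')
          · subst h'
            have := hm3 i h1 h3
            omega
        | some b =>
          rw [hs2] at hg
          obtain ⟨⟨i0, j0, h1, h2, h3, h4⟩, hb⟩ := hg
          show GoodUpTo cards (k + 1)
            (if (k : Int) - (m : Int) + 1 < b then some ((k : Int) - (m : Int) + 1) else some b)
          by_cases hw : (k : Int) - (m : Int) + 1 < b
          · rw [if_pos hw]
            refine ⟨⟨m, k, hm1, by omega, hm2, by omega⟩, ?_⟩
            intro i j hij hjk hc
            rcases Nat.lt_succ_iff_lt_or_eq.mp hjk with h' | h'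
            · have := hb i j hij h' hc
              omega
            · subst h'
              have := hm3 i hij hc
              omega
          · rw [if_neg hw]
            refine ⟨⟨i0, j0, h1, by omega, h3, h4⟩, ?_⟩
            intro i j hij hjk hc
            rcases Nat.lt_succ_iff_lt_or_eq.mp hjk with h' | h'
            · exact hb i j hij h' hc
            · subst h'
              have := hm3 i hij hc
              omega

theorem b_good (cards : List Int) : Good cards (least_consecutive_cards_to_match_alt cards) := by
  unfold least_consecutive_cards_to_match_alt
  dsimp only
  rw [show (0 : Int) = ((0 : Nat) : Int) from rfl, enumerate_eq_map_range cards 0,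
      List.foldl_map]
  simp only [Nat.zero_add]
  have H := (b_loop cards cards.length (le_refl _)).2
  cases hs2 : ((List.range cards.length).foldl
      (fun st (i : Nat) => lccmStep st ((i : Int), cards.getD i 0))
      ((PySem.Dict.empty : PySem.Dict Int Int), (none : Option Int))).2 with
  | none =>
    rw [hs2] at H
    show Good cards (-1)
    left
    exact ⟨rfl, fun i j hd => H i j hd.1 hd.2.1 hd.2.2⟩
  | some r =>
    rw [hs2] at H
    show Good cards r
    obtain ⟨⟨i, j, h1, h2, h3, h4⟩, hb⟩ := H
    right
    exact ⟨⟨i, j, ⟨h1, h2, h3⟩, h4⟩, fun i j hd => hb i j hd.1 hd.2.1 hd.2.2⟩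

-- ===== VERDICT (by name: the statement is the Claim_ definition above) =====
theorem least_consecutive_cards_to_match_spec : Claim_equal_least_consecutive_cards_to_match := by
  intro cards _
  exact good_unique (a_good cards) (b_good cards)
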